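-- pv_equiv track=rewrite | github.com/albanie/typst2mathjax | streamlit_utils.py | use_latex_delimiters
-- ===== SOURCE A (Python) =====
-- def use_latex_delimiters(text: str) -> str:
--     """Convert text with inline mathjax to use Latex delimiters (streamlit seems
--     to struggle with inline mathjax).
--     """
--     replacements = {
--         "\\(": "$",
--         "\\)": "$",
--         "\\[": "$$",
--         "\\]": "$$",
--     }
--     for key, val in replacements.items():
--         text = text.replace(key, val)
--     return text
-- ===== SOURCE B (Python) =====
-- def use_latex_delimiters(text: str) -> str:
--     """Convert text with inline mathjax to use Latex delimiters (streamlit seems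
--     to struggle with inline mathjax).
--     """
--     out = []
--     i = 0
--     n = len(text)
--     while i < n:
--         c = text[i]
--         if c == "\\" and i + 1 < n:
--             d = text[i + 1]
--             if d in "()":
--                 out.append("$")
--                 i += 2
--                 continue
--             if d in "[]":
--                 out.append("$$")
--                 i += 2
--                 continue
--         out.append(c)
--         i += 1
--     return "".join(out)
-- ===== Notes on version B (the rewrite author's own statement) =====
-- stated objective: alternative
-- what changed: Replaces A's four sequential full-text str.replace passes (each building an intermediate string) with one explicit left-to-right scan that dispatches on a backslash followed by one of ()[] and joins the pieces once; same output, single traversal instead of four.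
import Mathlib
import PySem

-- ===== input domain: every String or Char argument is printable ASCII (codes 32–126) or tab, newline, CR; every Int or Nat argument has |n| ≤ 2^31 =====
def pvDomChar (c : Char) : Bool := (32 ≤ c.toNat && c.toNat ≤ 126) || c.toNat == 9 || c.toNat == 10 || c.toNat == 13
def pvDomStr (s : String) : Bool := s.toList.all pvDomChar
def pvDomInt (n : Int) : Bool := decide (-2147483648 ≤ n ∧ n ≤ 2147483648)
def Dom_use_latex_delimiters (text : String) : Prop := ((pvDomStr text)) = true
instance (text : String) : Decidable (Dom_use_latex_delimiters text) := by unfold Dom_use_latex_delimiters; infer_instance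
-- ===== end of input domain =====

-- B replaces A's four sequential full-text str.replace passes by one left-to-right scan over
-- the characters dispatching on '\' followed by one of ()[] (alternative single-pass algorithm,
-- same return value on every input).

-- ===== PORT A =====
def use_latex_delimiters (text : String) : String :=
  let replacements : PySem.Dict String String :=
    ((((PySem.Dict.empty).insert "\\(" "$").insert "\\)" "$").insert "\\[" "$$").insert "\\]" "$$"
  replacements.items.foldl (fun t kv => PySem.Str.replace t kv.1 kv.2) text

-- ===== PORT B =====
-- the single left-to-right scan of Source B ("while i < n" with a two-character lookahead)
def pvScanB : List Char → List Char
  | [] => []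
  | [c] => [c]
  | c :: d :: rest =>
    if c = '\\' then
      if d = '(' ∨ d = ')' then '$' :: pvScanB rest
      else if d = '[' ∨ d = ']' then '$' :: '$' :: pvScanB rest
      else c :: pvScanB (d :: rest)
    else c :: pvScanB (d :: rest)

def use_latex_delimiters_alt (text : String) : String :=
  String.ofList (pvScanB text.toList)

-- ===== PRECONDITION & SPEC =====
def Spec_use_latex_delimiters (text : String) (out : String) : Prop := out = use_latex_delimiters_alt text
instance (text : String) (out : String) : Decidable (Spec_use_latex_delimiters text out) := by unfold Spec_use_latex_delimiters; infer_instance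

-- ===== CLAIM (what is proved, stated in full; the proofs are below) =====
def Claim_equal_use_latex_delimiters : Prop := ∀ (text : String), Dom_use_latex_delimiters text → Spec_use_latex_delimiters text (use_latex_delimiters text)

-- ===== LEMMAS AND PROOFS =====

-- a single str.replace with a two-character pattern '\' x, written as a direct scan
def pvScan2 (x : Char) (v : List Char) : List Char → List Char
  | [] => []
  | c :: t =>
    if c = '\\' ∧ t.head? = some x then v ++ pvScan2 x v t.tail
    else c :: pvScan2 x v t
termination_by l => l.length
decreasing_by all_goals (simp [List.length_tail]; try omega)

lemma pvScan2_nil (x : Char) (v : List Char) : pvScan2 x v [] = [] := by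
  rw [pvScan2]

lemma pvScan2_pass (x : Char) (v : List Char) (c : Char) (t : List Char)
    (h : ¬ (c = '\\' ∧ t.head? = some x)) :
    pvScan2 x v (c :: t) = c :: pvScan2 x v t := by
  rw [pvScan2, if_neg h]

lemma pvScan2_match (x : Char) (v t : List Char) :
    pvScan2 x v ('\\' :: x :: t) = v ++ pvScan2 x v t := by
  rw [pvScan2, if_pos (by simp)]
  simp

lemma pvGo_eq_scan2 (x : Char) (v : List Char) :
    ∀ fuel l acc, l.length ≤ fuel →
      PySem.Chars.replace.go ['\\', x] v fuel l acc = acc.reverse ++ pvScan2 x v l := by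
  intro fuel
  induction fuel with
  | zero =>
      intro l acc h
      have : l = [] := List.eq_nil_of_length_eq_zero (Nat.le_zero.mp h)
      subst this
      simp [PySem.Chars.replace.go, pvScan2_nil]
  | succ n ih =>
      intro l acc h
      cases l with
      | nil => simp [PySem.Chars.replace.go, pvScan2_nil]
      | cons c t =>
        rw [PySem.Chars.replace.go]
        by_cases hp : List.isPrefixOf ['\\', x] (c :: t)
        · simp only [hp, if_pos]
          cases t with
          | nil => simp [List.isPrefixOf] at hp
          | cons d t' =>
            simp only [List.isPrefixOf, Bool.and_eq_true, beq_iff_eq] at hp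
            obtain ⟨hc, hd, -⟩ := hp
            subst hc; subst hd
            simp only [List.length_cons] at h
            rw [ih _ _ (by simp; omega)]
            rw [pvScan2_match]
            simp
        · simp only [hp, Bool.false_eq_true, if_false]
          rw [ih _ _ (by simp at h ⊢; omega)]
          rw [pvScan2_pass]
          · simp
          · rintro ⟨hc, ht⟩
            subst hc
            cases t with
            | nil => simp at ht
            | cons d t' =>
              simp at ht
              subst ht
              simp [List.isPrefixOf] at hp

lemma pvReplace_eq_scan2 (x : Char) (v s : List Char) :
    PySem.Chars.replace s ['\\', x] v = pvScan2 x v s := by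
  rw [PySem.Chars.replace]
  simp only [List.isEmpty_cons, Bool.false_eq_true, if_false]
  exact pvGo_eq_scan2 x v s.length s [] (le_refl _)

-- head of the scan output: either the original head or '$'
lemma pvScan2_head (x : Char) (v l : List Char) (hv : v.head? = some '$') :
    (pvScan2 x v l).head? = l.head? ∨ (pvScan2 x v l).head? = some '$' := by
  cases l with
  | nil => left; simp [pvScan2_nil]
  | cons c t =>
    by_cases h : c = '\\' ∧ t.head? = some x
    · right
      obtain ⟨hc, ht⟩ := h
      subst hc
      cases t with
      | nil => simp at ht
      | cons d t' =>
        simp only [List.head?_cons, Option.some.injEq] at ht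
        subst ht
        rw [pvScan2_match]
        cases v with
        | nil => simp at hv
        | cons a w => simp at hv; simp [hv]
    · left
      rw [pvScan2_pass x v c t h]
      simp

-- a scan whose pattern char is neither '\' nor '$' passes a '\' through when the
-- next character is '\' or '$'
lemma pvScan2_step (x : Char) (v : List Char) (hx1 : x ≠ '\\') (hx2 : x ≠ '$')
    (Y : List Char) (hY : Y.head? = some '\\' ∨ Y.head? = some '$') :
    pvScan2 x v ('\\' :: Y) = '\\' :: pvScan2 x v Y := by
  apply pvScan2_pass
  rintro ⟨-, he⟩
  rcases hY with h | h
  · rw [h] at he; exact hx1 (Option.some.inj he).symm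
  · rw [h] at he; exact hx2 (Option.some.inj he).symm

lemma pvScanB_cons_ne (c : Char) (t : List Char) (hc : c ≠ '\\') :
    pvScanB (c :: t) = c :: pvScanB t := by
  cases t with
  | nil => rw [pvScanB, pvScanB]
  | cons d rest => rw [pvScanB, if_neg hc]

-- the chain of the four scans is the combined single-pass scan
lemma pvChain_eq_scanB (s : List Char) :
    pvScan2 ']' ['$', '$'] (pvScan2 '[' ['$', '$'] (pvScan2 ')' ['$'] (pvScan2 '(' ['$'] s)))
      = pvScanB s := by
  induction hn : s.length using Nat.strong_induction_on generalizing s with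
  | _ n ih =>
  subst hn
  cases s with
  | nil => simp [pvScan2_nil, pvScanB]
  | cons c t =>
    by_cases hc : c = '\\'
    · subst hc
      cases t with
      | nil =>
        rw [pvScan2_pass _ _ _ _ (by simp), pvScan2_nil,
            pvScan2_pass _ _ _ _ (by simp), pvScan2_nil,
            pvScan2_pass _ _ _ _ (by simp), pvScan2_nil,
            pvScan2_pass _ _ _ _ (by simp), pvScan2_nil, pvScanB]
      | cons d rest =>
        have ihrest := ih rest.length (by simp) rest rfl
        by_cases h1 : d = '('
        · subst h1
          rw [pvScan2_match '(' ['$'] rest, List.singleton_append,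
              pvScan2_pass ')' ['$'] '$' _ (by simp),
              pvScan2_pass '[' ['$', '$'] '$' _ (by simp),
              pvScan2_pass ']' ['$', '$'] '$' _ (by simp)]
          rw [pvScanB, if_pos rfl, if_pos (Or.inl rfl), ihrest]
        · by_cases h2 : d = ')'
          · subst h2
            rw [pvScan2_pass '(' ['$'] '\\' (')' :: rest) (by simp),
                pvScan2_pass '(' ['$'] ')' rest (by simp),
                pvScan2_match ')' ['$'] (pvScan2 '(' ['$'] rest), List.singleton_append,
                pvScan2_pass '[' ['$', '$'] '$' _ (by simp),
                pvScan2_pass ']' ['$', '$'] '$' _ (by simp)]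
            rw [pvScanB, if_pos rfl, if_pos (Or.inr rfl), ihrest]
          · by_cases h3 : d = '['
            · subst h3
              rw [pvScan2_pass '(' ['$'] '\\' ('[' :: rest) (by simp),
                  pvScan2_pass '(' ['$'] '[' rest (by simp),
                  pvScan2_pass ')' ['$'] '\\' _ (by simp),
                  pvScan2_pass ')' ['$'] '[' _ (by simp),
                  pvScan2_match '[' ['$', '$'] _]
              simp only [List.cons_append, List.nil_append]
              rw [pvScan2_pass ']' ['$', '$'] '$' _ (by simp),
                  pvScan2_pass ']' ['$', '$'] '$' _ (by simp)]
              rw [pvScanB, if_pos rfl, if_neg (by simp), if_pos (Or.inl rfl), ihrest]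
            · by_cases h4 : d = ']'
              · subst h4
                rw [pvScan2_pass '(' ['$'] '\\' (']' :: rest) (by simp),
                    pvScan2_pass '(' ['$'] ']' rest (by simp),
                    pvScan2_pass ')' ['$'] '\\' _ (by simp),
                    pvScan2_pass ')' ['$'] ']' _ (by simp),
                    pvScan2_pass '[' ['$', '$'] '\\' _ (by simp),
                    pvScan2_pass '[' ['$', '$'] ']' _ (by simp),
                    pvScan2_match ']' ['$', '$'] _]
                simp only [List.cons_append, List.nil_append]
                rw [pvScanB, if_pos rfl, if_neg (by simp), if_pos (Or.inr rfl), ihrest]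
              · by_cases h5 : d = '\\'
                · subst h5
                  rw [pvScan2_pass '(' ['$'] '\\' ('\\' :: rest) (by simp)]
                  set Y1 := pvScan2 '(' ['$'] ('\\' :: rest) with hY1
                  have hh1 : Y1.head? = some '\\' ∨ Y1.head? = some '$' := by
                    rcases pvScan2_head '(' ['$'] ('\\' :: rest) (by simp) with h | h
                    · left; rw [hY1, h]; simp
                    · right; rw [hY1]; exact h
                  rw [pvScan2_step ')' ['$'] (by decide) (by decide) Y1 hh1]
                  set Y2 := pvScan2 ')' ['$'] Y1 with hY2
                  have hh2 : Y2.head? = some '\\' ∨ Y2.head? = some '$' := by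
                    rcases pvScan2_head ')' ['$'] Y1 (by simp) with h | h
                    · rw [hY2, h]; exact hh1
                    · right; rw [hY2]; exact h
                  rw [pvScan2_step '[' ['$', '$'] (by decide) (by decide) Y2 hh2]
                  set Y3 := pvScan2 '[' ['$', '$'] Y2 with hY3
                  have hh3 : Y3.head? = some '\\' ∨ Y3.head? = some '$' := by
                    rcases pvScan2_head '[' ['$', '$'] Y2 (by simp) with h | h
                    · rw [hY3, h]; exact hh2
                    · right; rw [hY3]; exact h
                  rw [pvScan2_step ']' ['$', '$'] (by decide) (by decide) Y3 hh3]
                  rw [hY3, hY2, hY1]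
                  rw [ih ('\\' :: rest).length (by simp) ('\\' :: rest) rfl]
                  rw [pvScanB, if_pos rfl, if_neg (by simp), if_neg (by simp)]
                · -- d is an ordinary character: every scan passes both characters through
                  have ihd := ih (d :: rest).length (by simp) (d :: rest) rfl
                  rw [pvScan2_pass '(' ['$'] '\\' (d :: rest) (by simp [h1]),
                      pvScan2_pass '(' ['$'] d rest (by simp [h5]),
                      pvScan2_pass ')' ['$'] '\\' _ (by simp [h2]),
                      pvScan2_pass ')' ['$'] d _ (by simp [h5]),
                      pvScan2_pass '[' ['$', '$'] '\\' _ (by simp [h3]),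
                      pvScan2_pass '[' ['$', '$'] d _ (by simp [h5]),
                      pvScan2_pass ']' ['$', '$'] '\\' _ (by simp [h4]),
                      pvScan2_pass ']' ['$', '$'] d _ (by simp [h5])]
                  rw [pvScanB, if_pos rfl, if_neg (by simp [h1, h2]),
                      if_neg (by simp [h3, h4])]
                  rw [pvScanB_cons_ne d rest h5]
                  rw [ihrest]
    · -- c is not a backslash: every scan passes it through
      have iht := ih t.length (by simp) t rfl
      rw [pvScan2_pass '(' ['$'] c t (by simp [hc]),
          pvScan2_pass ')' ['$'] c _ (by simp [hc]),
          pvScan2_pass '[' ['$', '$'] c _ (by simp [hc]),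
          pvScan2_pass ']' ['$', '$'] c _ (by simp [hc])]
      rw [pvScanB_cons_ne c t hc, iht]

-- ===== VERDICT (by name: the statement is the Claim_ definition above) =====
theorem use_latex_delimiters_spec : Claim_equal_use_latex_delimiters := by
  intro text _
  unfold Spec_use_latex_delimiters use_latex_delimiters use_latex_delimiters_alt
  show List.foldl (fun t kv => PySem.Str.replace t kv.1 kv.2) text
      [("\\(", "$"), ("\\)", "$"), ("\\[", "$$"), ("\\]", "$$")]
      = String.ofList (pvScanB text.toList)
  simp only [List.foldl]
  simp only [PySem.Str.replace, String.toList_ofList]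
  rw [show ("\\(" : String).toList = ['\\', '('] from rfl,
      show ("\\)" : String).toList = ['\\', ')'] from rfl,
      show ("\\[" : String).toList = ['\\', '['] from rfl,
      show ("\\]" : String).toList = ['\\', ']'] from rfl,
      show ("$" : String).toList = ['$'] from rfl,
      show ("$$" : String).toList = ['$', '$'] from rfl]
  rw [pvReplace_eq_scan2, pvReplace_eq_scan2, pvReplace_eq_scan2, pvReplace_eq_scan2]
  exact congrArg String.ofList (pvChain_eq_scanB text.toList)
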